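-- pv_equiv track=rewrite | github.com/rbeezer/LaTeX3LaTeX | utilities.py | frombase52
-- ===== SOURCE A (Python) =====
-- def frombase52(string):
--
--     string_backward = string[::-1]
--
--     ans = 0
--     base = 52
--     base_ct = ord('a')
--     for i, char in enumerate(string_backward):
--         this_num = ord(char)
--         if this_num >= 97:
--             num_normalized = this_num - 97
--         else:
--             num_normalized = this_num - 65
--         ans += base**i * num_normalized
--
--     return ans
-- ===== SOURCE B (Python) =====
-- def frombase52(string):
--     ans = 0
--     for char in string:
--         o = ord(char)
--         ans = ans * 52 + (o - 97 if o >= 97 else o - 65)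
--     return ans
-- ===== Notes on version B (the rewrite author's own statement) =====
-- stated objective: faster
-- what changed: Replaces the reverse-then-enumerate loop that computes 52**i for each position with a single forward Horner pass (ans = ans*52 + digit), removing the per-position big-power computation.
import Mathlib
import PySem

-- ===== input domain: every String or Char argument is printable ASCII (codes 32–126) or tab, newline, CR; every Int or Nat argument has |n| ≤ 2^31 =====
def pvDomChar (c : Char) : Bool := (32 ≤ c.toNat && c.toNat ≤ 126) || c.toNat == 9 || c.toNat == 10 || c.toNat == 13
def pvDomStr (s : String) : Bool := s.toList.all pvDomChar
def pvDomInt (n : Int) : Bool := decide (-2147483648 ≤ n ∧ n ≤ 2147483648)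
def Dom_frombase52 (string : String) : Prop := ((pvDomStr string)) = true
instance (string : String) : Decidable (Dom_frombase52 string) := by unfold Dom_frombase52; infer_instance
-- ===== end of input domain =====

-- B replaces A's reverse-then-enumerate loop (with a 52**i power per position) by a single
-- forward Horner pass ans = ans*52 + digit; objective: faster (asymptotic, O(n) vs O(n^2)).

-- ===== PORT A =====
-- A's for-loop over enumerate(string_backward), carrying the index i and the accumulator ans
def frombase52Loop : List Char → Nat → Int → Int
  | [], _, ans => ans
  | char :: rest, i, ans =>
      let this_num : Int := (char.toNat : Int)
      let num_normalized : Int := if this_num ≥ 97 then this_num - 97 else this_num - 65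
      frombase52Loop rest (i + 1) (ans + 52 ^ i * num_normalized)

def frombase52 (string : String) : Int :=
  -- string[::-1]
  let string_backward : String := (PySem.Str.slice? string none none (-1)).getD ""
  frombase52Loop string_backward.toList 0 0

-- ===== PORT B =====
def frombase52_alt (string : String) : Int :=
  string.toList.foldl
    (fun ans char =>
      let o : Int := (char.toNat : Int)
      ans * 52 + (if o ≥ 97 then o - 97 else o - 65)) 0

-- ===== PRECONDITION & SPEC =====
def Spec_frombase52 (string : String) (out : Int) : Prop := out = frombase52_alt string
instance (string : String) (out : Int) : Decidable (Spec_frombase52 string out) := by unfold Spec_frombase52; infer_instance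

-- ===== CLAIM (what is proved, stated in full; the proofs are below) =====
def Claim_equal_frombase52 : Prop := ∀ (string : String), Dom_frombase52 string → Spec_frombase52 string (frombase52 string)

-- ===== LEMMAS AND PROOFS =====

def pvDig (c : Char) : Int :=
  if (c.toNat : Int) ≥ 97 then (c.toNat : Int) - 97 else (c.toNat : Int) - 65

-- little-endian base-52 value of a digit list
def pvHrev : List Char → Int
  | [] => 0
  | c :: t => pvDig c + 52 * pvHrev t

theorem pvLoopA_eq (l : List Char) : ∀ (i : Nat) (a : Int),
    frombase52Loop l i a = a + 52 ^ i * pvHrev l := by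
  induction l with
  | nil => intro i a; simp [frombase52Loop, pvHrev]
  | cons c t ih =>
      intro i a
      simp only [frombase52Loop, pvHrev, ih, pvDig, pow_succ]
      ring

theorem pvHrev_append (xs : List Char) (c : Char) :
    pvHrev (xs ++ [c]) = pvHrev xs + 52 ^ xs.length * pvDig c := by
  induction xs with
  | nil => simp [pvHrev]
  | cons d t ih =>
      simp only [List.cons_append, pvHrev, ih, List.length_cons, pow_succ]
      ring

theorem pvFoldB_eq (l : List Char) : ∀ (a : Int),
    l.foldl (fun ans char =>
      let o : Int := (char.toNat : Int)
      ans * 52 + (if o ≥ 97 then o - 97 else o - 65)) a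
    = a * 52 ^ l.length + pvHrev l.reverse := by
  induction l with
  | nil => intro a; simp [pvHrev]
  | cons c t ih =>
      intro a
      simp only [List.foldl_cons, ih, List.reverse_cons, pvHrev_append,
        List.length_reverse, List.length_cons, pow_succ, pvDig]
      ring

-- ===== VERDICT (by name: the statement is the Claim_ definition above) =====
theorem frombase52_spec : Claim_equal_frombase52 := by
  intro s _
  unfold Spec_frombase52 frombase52 frombase52_alt
  rw [PySem.Str.slice?_none_none_neg_one]
  simp only [Option.getD_some, pvLoopA_eq, pvFoldB_eq]
  simp
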